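-- pv_equiv track=rewrite | github.com/ivpdev/rnn-keras | omq/omq_prepare.py | generate_training_data_words
-- ===== SOURCE A (Python) =====
-- hyper_params = {
--     'seq_length_chars': 10,
--     'seq_length_words': 3,
--     'empty_char': '\t'
-- }
--
-- def generate_seqs_from_words(words):
--     dataX = []
--     dataY = []
--     n_words = len(words)
--     seq_length = hyper_params['seq_length_words']
--     empty_char = '\t'
--
--     #TODO check if input is shorter then seq_length
--     for i in range(0, n_words - 1, 1):
--         if (i < (n_words - seq_length)):
--
--             seq_in = words[i:i + seq_length]
--             seq_out = words[i + seq_length]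
--         else:
--             seq_in = words[i:n_words] + [empty_char for j in range(0, (seq_length - (n_words - i)))] #(empty_char * (seq_length - (n_words - i)))
--             seq_out = empty_char
--
--         dataX.append(seq_in)
--         dataY.append(seq_out)
--
--     return dataX, dataY
--
-- def generate_training_data_words(texts):
--     X = []
--     y = []
--     for text in texts:
--         X1, y1 = generate_seqs_from_words(text)
--         X.extend(X1)
--         y.extend(y1)
--
--     return X, y
-- ===== SOURCE B (Python) =====
-- hyper_params = {
--     'seq_length_chars': 10,
--     'seq_length_words': 3,
--     'empty_char': '\t'
-- }
--
-- def generate_training_data_words(texts):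
--     seq_length = hyper_params['seq_length_words']
--     empty_char = '\t'
--     X = []
--     y = []
--     for words in texts:
--         n = len(words)
--         # rolling window: start with the first window ...
--         win = (words[:seq_length] + [empty_char] * seq_length)[:seq_length]
--         # ... then for each successive target, emit and shift the window by one
--         for nxt in (words + [empty_char] * seq_length)[seq_length:n + seq_length - 1]:
--             X.append(win)
--             y.append(nxt)
--             win = win[1:] + [nxt]
--     return X, y
-- ===== Notes on version B (the rewrite author's own statement) =====
-- stated objective: alternative
-- what changed: B replaces A's indexed loop that builds each window by slicing (with a near-end branch that constructs padding on demand) by a single streaming pass per text that maintains a rolling window, emitting the window and the consumed target and then shifting the window by one (win = win[1:] + [nxt]).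
import Mathlib
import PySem

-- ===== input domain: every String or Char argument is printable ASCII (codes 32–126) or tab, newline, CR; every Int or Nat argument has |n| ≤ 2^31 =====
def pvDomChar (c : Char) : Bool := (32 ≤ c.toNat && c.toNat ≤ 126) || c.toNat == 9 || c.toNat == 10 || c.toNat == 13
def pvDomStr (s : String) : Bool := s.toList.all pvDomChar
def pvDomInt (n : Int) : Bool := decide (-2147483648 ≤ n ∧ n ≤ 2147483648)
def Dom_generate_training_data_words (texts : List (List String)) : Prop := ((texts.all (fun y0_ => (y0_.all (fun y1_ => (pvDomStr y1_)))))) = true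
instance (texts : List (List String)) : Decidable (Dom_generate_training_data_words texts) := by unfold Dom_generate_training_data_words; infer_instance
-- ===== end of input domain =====

-- B replaces A's index loop with per-window slicing/padding branch by a single streaming
-- pass per text that maintains a rolling window (shift left, append the consumed target);
-- objective: alternative (same cost, different mechanism).

-- ===== PORT A =====
def generate_seqs_from_words (words : List String) : List (List String) × List String :=
  let n : Int := words.length
  let seq_length : Int := 3
  let empty_char : String := "\t"
  (PySem.List.pyRange 0 (n - 1) 1).foldl (fun acc i =>
    if i < n - seq_length then
      (acc.1 ++ [PySem.List.slice words (some i) (some (i + seq_length))],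
       -- words[i+3] is in range in this branch, so pyGetD is exact here
       acc.2 ++ [PySem.List.pyGetD words (i + seq_length) ""])
    else
      (acc.1 ++ [PySem.List.slice words (some i) (some n) ++
                   (PySem.List.pyRange 0 (seq_length - (n - i)) 1).map (fun _ => empty_char)],
       acc.2 ++ [empty_char])) ([], [])

def generate_training_data_words (texts : List (List String)) : List (List String) × List String :=
  texts.foldl (fun acc text =>
    let r := generate_seqs_from_words text
    (acc.1 ++ r.1, acc.2 ++ r.2)) ([], [])

-- ===== PORT B =====
def generate_training_data_words_alt (texts : List (List String)) : List (List String) × List String :=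
  texts.foldl (fun acc words =>
    let n : Int := words.length
    let win0 := PySem.List.slice (PySem.List.slice words none (some 3) ++ ["\t", "\t", "\t"]) none (some 3)
    let stream := PySem.List.slice (words ++ ["\t", "\t", "\t"]) (some 3) (some (n + 3 - 1))
    let r := stream.foldl
      (fun (s : (List (List String) × List String) × List String) nxt =>
        ((s.1.1 ++ [s.2], s.1.2 ++ [nxt]),
         PySem.List.slice s.2 (some 1) none ++ [nxt]))
      ((acc.1, acc.2), win0)
    r.1) ([], [])

-- ===== PRECONDITION & SPEC =====
def Spec_generate_training_data_words (texts : List (List String)) (out : List (List String) × List String) : Prop := out = generate_training_data_words_alt texts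
instance (texts : List (List String)) (out : List (List String) × List String) : Decidable (Spec_generate_training_data_words texts out) := by unfold Spec_generate_training_data_words; infer_instance

-- ===== CLAIM (what is proved, stated in full; the proofs are below) =====
def Claim_equal_generate_training_data_words : Prop := ∀ (texts : List (List String)), Dom_generate_training_data_words texts → Spec_generate_training_data_words texts (generate_training_data_words texts)

-- ===== LEMMAS AND PROOFS =====

-- canonical per-text result both ports are reduced to
def canonX (words : List String) : List (List String) :=
  (List.range (words.length - 1)).map (fun t => ((words ++ ["\t", "\t", "\t"]).drop t).take 3)
def canonY (words : List String) : List String :=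
  ((words ++ ["\t", "\t", "\t"]).drop 3).take (words.length - 1)

-- a fold that appends one element to each component is a pair of maps
theorem foldl_pair_append {α β γ : Type} (l : List α) (f : α → β) (g : α → γ)
    (X : List β) (Y : List γ) :
    l.foldl (fun acc i => (acc.1 ++ [f i], acc.2 ++ [g i])) (X, Y)
      = (X ++ l.map f, Y ++ l.map g) := by
  induction l generalizing X Y with
  | nil => simp
  | cons a t ih => simp [List.foldl_cons, ih]

theorem map_range_getD {α : Type} (l : List α) (m k : Nat) (d : α)
    (h : m + k ≤ l.length) :
    (List.range k).map (fun j => l.getD (m + j) d) = (l.drop m).take k := by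
  induction k with
  | zero => simp
  | succ k ih =>
    have hk : m + k < l.length := by omega
    have hk' : k < (l.drop m).length := by simp; omega
    rw [List.range_succ, List.map_append, ih (by omega)]
    have : (l.drop m).take (k + 1) = (l.drop m).take k ++ [(l.drop m)[k]] := by
      rw [← List.concat_eq_append, List.take_concat_get]
    rw [this]
    simp [List.getElem_drop, List.getElem?_eq_getElem hk]

theorem seqs_eq (words : List String) :
    generate_seqs_from_words words
      = ((PySem.List.pyRange 0 ((words.length : Int) - 1) 1).map
            (fun i => PySem.List.slice (words ++ ["\t", "\t", "\t"]) (some i) (some (i + 3))),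
         PySem.List.slice (words ++ ["\t", "\t", "\t"]) (some 3) (some ((words.length : Int) + 2))) := by
  set N := words.length with hN
  set padded := words ++ ["\t", "\t", "\t"] with hp
  have hplen : padded.length = N + 3 := by simp [hp, ← hN]
  unfold generate_seqs_from_words
  simp only [← hN]
  have hstep : (fun (acc : List (List String) × List String) (i : Int) =>
      if i < (N : Int) - 3 then
        (acc.1 ++ [PySem.List.slice words (some i) (some (i + 3))],
         acc.2 ++ [PySem.List.pyGetD words (i + 3) ""])
      else
        (acc.1 ++ [PySem.List.slice words (some i) (some (N : Int)) ++
                     (PySem.List.pyRange 0 (3 - ((N : Int) - i)) 1).map (fun _ => "\t")],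
         acc.2 ++ ["\t"]))
      = (fun acc i =>
        (acc.1 ++ [if i < (N : Int) - 3 then PySem.List.slice words (some i) (some (i + 3))
                   else PySem.List.slice words (some i) (some (N : Int)) ++
                     (PySem.List.pyRange 0 (3 - ((N : Int) - i)) 1).map (fun _ => "\t")],
         acc.2 ++ [if i < (N : Int) - 3 then PySem.List.pyGetD words (i + 3) "" else "\t"])) := by
    funext acc i; split_ifs <;> rfl
  rw [hstep, foldl_pair_append, Prod.mk.injEq]
  refine ⟨?_, ?_⟩
  case _ =>
    -- X component
    simp only [List.nil_append]
    apply List.map_congr_left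
    intro i hi
    rw [PySem.List.mem_pyRange_one] at hi
    obtain ⟨k, rfl⟩ := Int.eq_ofNat_of_zero_le hi.1
    have hk1 : k < N - 1 := by omega
    simp only [show ((k:Int) + 3) = ((k:Int) + ((3:Nat):Int)) by norm_num,
        PySem.List.slice_natCast_add]
    by_cases hc : (k : Int) < (N : Int) - 3
    · rw [if_pos hc, hp, List.drop_append_of_le_length (by omega),
          List.take_append_of_le_length (by simp; omega)]
    · have hm : N - k ≤ 3 := by omega
      have hm2 : 2 ≤ N - k := by omega
      rw [if_neg hc, PySem.List.slice_natCast, hp,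
          List.drop_append_of_le_length (by omega), List.take_append,
          List.take_of_length_le (by simp; omega),
          List.take_of_length_le (by simp; omega)]
      congr 1
      rw [PySem.List.pyRange_one]
      simp only [Int.sub_zero, List.map_map]
      rw [show ((3:Int) - ((N:Int) - (k:Int))).toNat = 3 - (N - k) by omega]
      have htake : ∀ m, m ≤ 3 → (["\t","\t","\t"] : List String).take m
          = List.map ((fun _ => "\t") ∘ (fun j : Nat => (0:Int) + (j:Int))) (List.range m) := by
        decide
      rw [List.length_drop, htake _ (by omega)]
  case _ =>
    -- Y component
    simp only [List.nil_append]
    rw [show ((3:Int)) = (((3:Nat)):Int) by norm_num,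
        show ((N:Int) + 2) = (((N + 2 : Nat)):Int) by push_cast; ring,
        PySem.List.slice_natCast]
    rw [PySem.List.pyRange_one]
    simp only [Int.sub_zero, zero_add]
    rw [List.map_map]
    have hNt : ((N:Int) - 1).toNat = N - 1 := by omega
    rw [hNt]
    have : N + 2 - 3 = N - 1 := by omega
    rw [this, ← map_range_getD padded 3 (N-1) "" (by omega)]
    apply List.map_congr_left
    intro k hk
    rw [List.mem_range] at hk
    simp only [Function.comp]
    split_ifs with hc
    · have h3 : k + 3 < N := by omega
      rw [show ((k:Int) + ((3:Nat):Int)) = (((k + 3 : Nat)):Int) by push_cast; ring,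
          PySem.List.pyGetD_natCast]
      rw [List.getD_eq_getElem _ _ (show k + 3 < words.length by omega),
          List.getD_eq_getElem _ _ (show 3 + k < padded.length by omega)]
      simp only [hp]
      rw [List.getElem_append_left (by omega)]
      congr 1; omega
    · have h3 : N ≤ 3 + k := by omega
      rw [List.getD_eq_getElem _ _ (show 3 + k < padded.length by omega)]
      simp only [hp]
      rw [List.getElem_append_right (by omega)]
      have htab : ∀ j, (h : j < 3) → (["\t","\t","\t"] : List String)[j] = "\t" := by decide
      exact (htab _ (by omega)).symm

-- A's per-text result, in the canonical drop/take form
theorem seqs_canon (words : List String) :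
    generate_seqs_from_words words = (canonX words, canonY words) := by
  set N := words.length with hN
  rw [seqs_eq, Prod.mk.injEq]
  constructor
  · rw [PySem.List.pyRange_one]
    simp only [Int.sub_zero, List.map_map]
    rw [show ((N:Int) - 1).toNat = N - 1 by omega]
    unfold canonX
    apply List.map_congr_left
    intro k _
    simp only [Function.comp, zero_add]
    rw [show ((k:Int) + 3) = ((k:Int) + ((3:Nat):Int)) by norm_num,
        PySem.List.slice_natCast_add]
  · rw [show ((3:Int)) = (((3:Nat)):Int) by norm_num,
        show ((N:Int) + 2) = (((N + 2 : Nat)):Int) by push_cast; ring,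
        PySem.List.slice_natCast]
    unfold canonY
    rw [← hN, show N + 2 - 3 = N - 1 by omega]

-- the rolling-window fold invariant
theorem roll (p : List String) (k : Nat) :
    ∀ (j : Nat) (X : List (List String)) (Y : List String), 3 + j + k ≤ p.length →
    (((p.drop (3 + j)).take k).foldl
      (fun (s : (List (List String) × List String) × List String) nxt =>
        ((s.1.1 ++ [s.2], s.1.2 ++ [nxt]),
         PySem.List.slice s.2 (some 1) none ++ [nxt]))
      ((X, Y), (p.drop j).take 3))
    = ((X ++ (List.range k).map (fun t => (p.drop (j + t)).take 3),
        Y ++ (p.drop (3 + j)).take k),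
       (p.drop (j + k)).take 3) := by
  induction k with
  | zero => intro j X Y h; simp
  | succ k ih =>
    intro j X Y h
    have hjlt : 3 + j < p.length := by omega
    have hcons : (p.drop (3 + j)).take (k + 1) = p[3 + j] :: (p.drop (3 + j + 1)).take k := by
      rw [List.drop_eq_getElem_cons hjlt, List.take_succ_cons]
    rw [hcons, List.foldl_cons]
    dsimp only
    have hwin : PySem.List.slice ((p.drop j).take 3) (some 1) none ++ [p[3 + j]]
        = (p.drop (j + 1)).take 3 := by
      rw [show ((1:Int)) = (((1:Nat)):Int) by norm_num, PySem.List.slice_from_natCast]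
      rw [List.drop_take, show 3 - 1 = 2 by rfl, List.drop_drop]
      have hlen2 : 2 < (p.drop (j + 1)).length := by simp; omega
      have : (p.drop (j + 1)).take 3 = (p.drop (j + 1)).take 2 ++ [(p.drop (j + 1))[2]] := by
        rw [← List.concat_eq_append, List.take_concat_get]
      rw [this, List.getElem_drop]
      congr 3
      omega
    rw [hwin]
    rw [show (3 + j + 1) = (3 + (j + 1)) by omega, ih (j + 1) _ _ (by omega)]
    rw [Prod.mk.injEq, Prod.mk.injEq]
    refine ⟨⟨?_, ?_⟩, by rw [show j + 1 + k = j + (k + 1) by omega]⟩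
    · rw [List.range_succ_eq_map, List.map_cons, List.map_map, List.append_assoc,
          List.singleton_append, Nat.add_zero]
      congr 2
      apply List.map_congr_left
      intro t _
      simp only [Function.comp_apply, Nat.succ_eq_add_one]
      rw [show j + 1 + t = j + (t + 1) by omega]
    · rw [List.append_assoc, List.singleton_append]

-- (l.take n ++ m).take n = (l ++ m).take n
theorem take_take_append {α : Type} (l m : List α) (n : Nat) :
    (l.take n ++ m).take n = (l ++ m).take n := by
  rw [List.take_append, List.take_append, List.take_take, Nat.min_self, List.length_take]
  congr 2
  omega

-- B's per-text step in canonical form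
theorem alt_step (words : List String) (acc : List (List String) × List String) :
    (let n : Int := words.length
     let win0 := PySem.List.slice (PySem.List.slice words none (some 3) ++ ["\t", "\t", "\t"]) none (some 3)
     let stream := PySem.List.slice (words ++ ["\t", "\t", "\t"]) (some 3) (some (n + 3 - 1))
     let r := stream.foldl
       (fun (s : (List (List String) × List String) × List String) nxt =>
         ((s.1.1 ++ [s.2], s.1.2 ++ [nxt]),
          PySem.List.slice s.2 (some 1) none ++ [nxt]))
       ((acc.1, acc.2), win0)
     r.1)
    = (acc.1 ++ canonX words, acc.2 ++ canonY words) := by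
  set N := words.length with hN
  set padded := words ++ ["\t", "\t", "\t"] with hp
  have hplen : padded.length = N + 3 := by simp [hp, ← hN]
  simp only
  have hwin0 : PySem.List.slice (PySem.List.slice words none (some 3) ++ ["\t", "\t", "\t"]) none (some 3)
      = (padded.drop 0).take 3 := by
    rw [show ((3:Int)) = (((3:Nat)):Int) by norm_num,
        PySem.List.slice_to_natCast, PySem.List.slice_to_natCast,
        List.drop_zero, hp, take_take_append]
  have hs : PySem.List.slice padded (some 3) (some ((N:Int) + 3 - 1))
      = (padded.drop (3 + 0)).take (N + 2 - 3) := by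
    rw [show ((N:Int) + 3 - 1) = (((N + 2 : Nat)):Int) by push_cast; ring,
        show ((3:Int)) = (((3:Nat)):Int) by norm_num,
        PySem.List.slice_natCast]
  rw [hwin0, hs, roll padded (N + 2 - 3) 0 acc.1 acc.2 (by omega)]
  unfold canonX canonY
  simp only [← hN, ← hp, Nat.zero_add, show N + 2 - 3 = N - 1 by omega]

-- ===== VERDICT (by name: the statement is the Claim_ definition above) =====
theorem generate_training_data_words_spec : Claim_equal_generate_training_data_words := by
  intro texts _
  unfold Spec_generate_training_data_words generate_training_data_words generate_training_data_words_alt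
  congr 1
  funext acc words
  rw [alt_step, seqs_canon]
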